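-- pv_equiv track=rewrite | github.com/jbacus1/llmXive | code/llmxive-automation/helpers/llmxive_automation/main.py | _parse_brainstorm_response
-- ===== SOURCE A (Python) =====
-- from typing import List
--
-- from typing import Optional, Dict, Any
--
-- def _parse_brainstorm_response(response: str) -> List[Dict[str, str]]:
--     """Parse brainstormed ideas from model response"""
--     ideas = []
--
--     # Simple parsing - look for Title: and Body: patterns
--     lines = response.split('\n')
--     current_idea = {}
--
--     for line in lines:
--         if line.startswith("Title:") or line.startswith("- Title:"):
--             if current_idea:
--                 ideas.append(current_idea)
--             current_idea = {"title": line.split(":", 1)[1].strip()}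
--         elif line.startswith("Body:") or line.startswith("- Body:"):
--             if current_idea:
--                 current_idea["body"] = line.split(":", 1)[1].strip()
--
--     if current_idea and "title" in current_idea:
--         ideas.append(current_idea)
--
--     return ideas[:5]  # Limit to 5 ideas
-- ===== SOURCE B (Python) =====
-- from typing import List, Dict
--
-- def _parse_brainstorm_response(response: str) -> List[Dict[str, str]]:
--     """Parse brainstormed ideas by cutting the text into title-delimited blocks."""
--     TITLE = ("Title:", "- Title:")
--     BODY = ("Body:", "- Body:")
--
--     def after_colon(line):
--         return line.split(":", 1)[1].strip()
--
--     lines = response.split("\n")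
--     n = len(lines)
--     i = 0
--     while i < n and not lines[i].startswith(TITLE):  # drop everything before the first title
--         i += 1
--     ideas = []
--     while i < n:  # lines[i] is a title line; its block runs to the next title (or the end)
--         j = i + 1
--         while j < n and not lines[j].startswith(TITLE):
--             j += 1
--         idea = {"title": after_colon(lines[i])}
--         for line in reversed(lines[i + 1 : j]):  # last Body: line of the block wins
--             if line.startswith(BODY):
--                 idea["body"] = after_colon(line)
--                 break
--         ideas.append(idea)
--         i = j
--     return ideas[:5]
-- ===== Notes on version B (the rewrite author's own statement) =====
-- stated objective: alternative
-- what changed: Replaces A's single stateful scan with a mutable current-idea dict by a block decomposition: find the title lines, cut the text into title-delimited blocks, and take each block's title plus the last Body: line found by a backwards scan of the block.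
import Mathlib
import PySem

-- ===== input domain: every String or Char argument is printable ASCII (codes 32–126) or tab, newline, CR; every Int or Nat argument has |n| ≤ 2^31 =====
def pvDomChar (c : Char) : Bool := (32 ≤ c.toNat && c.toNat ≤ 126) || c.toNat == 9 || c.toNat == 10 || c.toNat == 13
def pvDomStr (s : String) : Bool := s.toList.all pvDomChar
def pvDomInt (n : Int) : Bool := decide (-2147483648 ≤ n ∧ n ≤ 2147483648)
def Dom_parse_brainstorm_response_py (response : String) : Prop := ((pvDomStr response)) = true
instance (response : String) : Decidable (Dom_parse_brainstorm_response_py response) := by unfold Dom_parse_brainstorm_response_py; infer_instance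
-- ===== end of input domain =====

-- B parses by cutting the text into title-delimited blocks (last Body: line of a block wins)
-- instead of A's single stateful scan with a mutable current-idea dict; alternative, same cost.


-- helpers shared by both ports (the same tests/expressions appear verbatim in Source A and Source B)
def pvIsTitle (l : String) : Bool :=
  PySem.Str.startswith l "Title:" || PySem.Str.startswith l "- Title:"

def pvIsBody (l : String) : Bool :=
  PySem.Str.startswith l "Body:" || PySem.Str.startswith l "- Body:"

-- line.split(":", 1)[1].strip(); both defaults are unreachable here: callers only pass lines
-- that start with "Title:"/"- Title:"/"Body:"/"- Body:", so a ':' exists and index 1 is in range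
def pvAfterColon (l : String) : String :=
  PySem.Str.strip ((PySem.List.pyGet? ((PySem.Str.splitMax? l ":" 1).getD []) 1).getD "")

-- ===== PORT A =====
-- the loop body of A's 'for line in lines'
def pvStepA (st : List (PySem.Dict String String) × PySem.Dict String String) (line : String) :
    List (PySem.Dict String String) × PySem.Dict String String :=
  if pvIsTitle line then
    (if st.2.items.isEmpty then st.1 else st.1 ++ [st.2],
     PySem.Dict.ofList [("title", pvAfterColon line)])
  else if pvIsBody line then
    (st.1, if st.2.items.isEmpty then st.2 else st.2.insert "body" (pvAfterColon line))
  else st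

def parse_brainstorm_response_py (response : String) : List (List (String × String)) :=
  let lines := (PySem.Str.split? response "\n").getD []
  let p := lines.foldl pvStepA ([], PySem.Dict.empty)
  let ideas := if !p.2.items.isEmpty && p.2.contains "title" then p.1 ++ [p.2] else p.1
  (ideas.take 5).map (fun d => d.items)   -- ideas[:5] (PySem.List.slice_to)

-- ===== PORT B =====
-- Source B's outer while loop: lines is the suffix from the current title line; the inner
-- 'while j < n and not title' scan is the takeWhile/dropWhile split of the tail,
-- 'for line in reversed(block): … break' is reverse.find?
def pvParseBlocks : List String → List (List (String × String))
  | [] => []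
  | first :: rest =>
    let block := rest.takeWhile (fun l => !pvIsTitle l)
    let rest' := rest.dropWhile (fun l => !pvIsTitle l)
    (match block.reverse.find? pvIsBody with
     | some l => [("title", pvAfterColon first), ("body", pvAfterColon l)]
     | none   => [("title", pvAfterColon first)]) :: pvParseBlocks rest'
termination_by ls => ls.length
decreasing_by
  simp only [List.length_cons]
  exact Nat.lt_succ_of_le (List.length_dropWhile_le _ _)

def parse_brainstorm_response_py_alt (response : String) : List (List (String × String)) :=
  -- the first while loop (advance i to the first title line) is dropWhile
  let lines := ((PySem.Str.split? response "\n").getD []).dropWhile (fun l => !pvIsTitle l)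
  (pvParseBlocks lines).take 5

-- ===== PRECONDITION & SPEC =====
def Spec_parse_brainstorm_response_py (response : String) (out : List (List (String × String))) : Prop := out = parse_brainstorm_response_py_alt response
instance (response : String) (out : List (List (String × String))) : Decidable (Spec_parse_brainstorm_response_py response out) := by unfold Spec_parse_brainstorm_response_py; infer_instance

-- ===== CLAIM (what is proved, stated in full; the proofs are below) =====
def Claim_equal_parse_brainstorm_response_py : Prop := ∀ (response : String), Dom_parse_brainstorm_response_py response → Spec_parse_brainstorm_response_py response (parse_brainstorm_response_py response)

-- ===== LEMMAS AND PROOFS =====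

-- current_idea in A is always {}, {"title": t} or {"title": t, "body": b}
def pvMkIdea (t : String) (ob : Option String) : PySem.Dict String String :=
  match ob with
  | none => PySem.Dict.ofList [("title", t)]
  | some b => PySem.Dict.ofList [("title", t), ("body", b)]

-- first-of-two options (a <|> b, spelled out so that `cases` reduces it)
def pvOr {α : Type} (a b : Option α) : Option α :=
  match a with
  | some x => some x
  | none => b

-- the body value a block contributes: the last Body: line, read backwards
def pvBodyOf (block : List String) : Option String :=
  (block.reverse.find? pvIsBody).map pvAfterColon

-- Dict-valued twin of pvParseBlocks
def pvBlocksD : List String → List (PySem.Dict String String)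
  | [] => []
  | x :: r =>
    pvMkIdea (pvAfterColon x) (pvBodyOf (r.takeWhile (fun l => !pvIsTitle l))) ::
      pvBlocksD (r.dropWhile (fun l => !pvIsTitle l))
termination_by ls => ls.length
decreasing_by
  simp only [List.length_cons]
  exact Nat.lt_succ_of_le (List.length_dropWhile_le _ _)

theorem pvBlocksD_nil : pvBlocksD [] = [] := by rw [pvBlocksD]

theorem pvBlocksD_cons (x : String) (r : List String) :
    pvBlocksD (x :: r) =
      pvMkIdea (pvAfterColon x) (pvBodyOf (r.takeWhile (fun l => !pvIsTitle l))) ::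
        pvBlocksD (r.dropWhile (fun l => !pvIsTitle l)) := by rw [pvBlocksD]

theorem pvOr_none {α : Type} (a : Option α) : pvOr a none = a := by cases a <;> rfl

theorem pvMkIdea_ne_nil (t : String) (ob : Option String) :
    (pvMkIdea t ob).items.isEmpty = false := by
  cases ob <;> rfl

theorem pvMkIdea_contains (t : String) (ob : Option String) :
    (pvMkIdea t ob).contains "title" = true := by
  cases ob <;> rfl

theorem pvMkIdea_insert (t b : String) (ob : Option String) :
    (pvMkIdea t ob).insert "body" b = pvMkIdea t (some b) := by
  cases ob <;> rfl

-- flushing the final current_idea, as in A's epilogue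
def pvFinishA (p : List (PySem.Dict String String) × PySem.Dict String String) :
    List (PySem.Dict String String) :=
  if !p.2.items.isEmpty && p.2.contains "title" then p.1 ++ [p.2] else p.1

theorem pvStepA_title (st : List (PySem.Dict String String) × PySem.Dict String String)
    (l : String) (hT : pvIsTitle l = true) :
    pvStepA st l =
      (if st.2.items.isEmpty then st.1 else st.1 ++ [st.2], pvMkIdea (pvAfterColon l) none) := by
  simp [pvStepA, hT]; rfl

theorem pvStepA_body (st : List (PySem.Dict String String) × PySem.Dict String String)
    (l : String) (hT : pvIsTitle l = false) (hB : pvIsBody l = true) :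
    pvStepA st l =
      (st.1, if st.2.items.isEmpty then st.2 else st.2.insert "body" (pvAfterColon l)) := by
  simp [pvStepA, hT, hB]

theorem pvStepA_other (st : List (PySem.Dict String String) × PySem.Dict String String)
    (l : String) (hT : pvIsTitle l = false) (hB : pvIsBody l = false) :
    pvStepA st l = st := by
  simp [pvStepA, hT, hB]

-- the main invariant: A's fold from an open idea (title t, pending body ob) flushes to
-- exactly that idea (with the block's last body, if any) followed by B's remaining blocks
theorem pvFoldA_blocksD (ls : List String) : ∀ (t : String) (ob : Option String)
    (ideas : List (PySem.Dict String String)),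
    pvFinishA (ls.foldl pvStepA (ideas, pvMkIdea t ob)) =
      ideas ++ pvMkIdea t (pvOr (pvBodyOf (ls.takeWhile (fun l => !pvIsTitle l))) ob) ::
        pvBlocksD (ls.dropWhile (fun l => !pvIsTitle l)) := by
  induction ls with
  | nil =>
    intro t ob ideas
    simp [pvFinishA, pvMkIdea_ne_nil, pvMkIdea_contains, pvBlocksD, pvBodyOf, pvOr]
  | cons l r ih =>
    intro t ob ideas
    by_cases hT : pvIsTitle l = true
    · rw [List.foldl_cons, pvStepA_title _ _ hT]
      rw [pvMkIdea_ne_nil]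
      simp only [Bool.false_eq_true, if_false]
      rw [ih]
      simp only [List.takeWhile_cons, List.dropWhile_cons, hT, Bool.not_true, Bool.false_eq_true, if_false]
      rw [pvBlocksD_cons]
      simp only [List.append_assoc, List.singleton_append]
      congr 2
      rw [pvOr_none]
    · rw [Bool.not_eq_true] at hT
      rw [List.foldl_cons]
      simp only [List.takeWhile_cons, List.dropWhile_cons, hT, Bool.not_false, if_true]
      by_cases hB : pvIsBody l = true
      · rw [pvStepA_body _ _ hT hB, pvMkIdea_ne_nil]
        simp only [Bool.false_eq_true, if_false]
        rw [pvMkIdea_insert, ih]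
        congr 2
        simp only [pvBodyOf, List.reverse_cons, List.find?_append]
        cases (r.takeWhile (fun l => !pvIsTitle l)).reverse.find? pvIsBody with
        | none => simp [pvOr, List.find?, hB]
        | some y => rfl
      · rw [Bool.not_eq_true] at hB
        rw [pvStepA_other _ _ hT hB, ih]
        congr 2
        simp only [pvBodyOf, List.reverse_cons, List.find?_append]
        cases (r.takeWhile (fun l => !pvIsTitle l)).reverse.find? pvIsBody with
        | none => simp [pvOr, List.find?, hB]
        | some y => rfl

-- body lines (and anything else) before the first title line are ignored by A
theorem pvSkipPrefix (ls : List String) (ideas : List (PySem.Dict String String)) :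
    ls.foldl pvStepA (ideas, PySem.Dict.empty) =
      (ls.dropWhile (fun l => !pvIsTitle l)).foldl pvStepA (ideas, PySem.Dict.empty) := by
  induction ls with
  | nil => rfl
  | cons l r ih =>
    by_cases hT : pvIsTitle l = true
    · simp [hT]
    · rw [Bool.not_eq_true] at hT
      have hstep : pvStepA (ideas, PySem.Dict.empty) l = (ideas, PySem.Dict.empty) := by
        by_cases hB : pvIsBody l = true
        · rw [pvStepA_body _ _ hT hB]; rfl
        · rw [Bool.not_eq_true] at hB
          exact pvStepA_other _ _ hT hB
      simp [hT, hstep, ih]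

-- pvParseBlocks is pvBlocksD rendered as item lists
theorem pvBlocks_items (ls : List String) :
    pvParseBlocks ls = (pvBlocksD ls).map (fun d => d.items) := by
  induction hn : ls.length using Nat.strong_induction_on generalizing ls with
  | _ n ih =>
    cases ls with
    | nil => rw [pvParseBlocks, pvBlocksD_nil]; rfl
    | cons x r =>
      rw [pvParseBlocks, pvBlocksD_cons]
      simp only [List.map_cons, List.cons.injEq]
      constructor
      · simp only [pvBodyOf]
        cases (r.takeWhile (fun l => !pvIsTitle l)).reverse.find? pvIsBody with
        | none => rfl
        | some y => rfl
      · subst hn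
        exact ih (r.dropWhile (fun l => !pvIsTitle l)).length
          (Nat.lt_succ_of_le (List.length_dropWhile_le _ _)) _ rfl

-- the head of a dropWhile result falsifies the predicate
theorem pvHeadDropWhile {α : Type} (p : α → Bool) :
    ∀ (ls : List α) (x : α) (xs : List α), ls.dropWhile p = x :: xs → p x = false := by
  intro ls
  induction ls with
  | nil => intro x xs h; simp [List.dropWhile] at h
  | cons a t ih =>
    intro x xs h
    rw [List.dropWhile_cons] at h
    by_cases ha : p a = true
    · rw [ha] at h; simp at h; exact ih x xs h
    · rw [Bool.not_eq_true] at ha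
      rw [ha] at h; simp at h
      rw [← h.1]; exact ha

-- ===== VERDICT (by name: the statement is the Claim_ definition above) =====
theorem parse_brainstorm_response_py_spec : Claim_equal_parse_brainstorm_response_py := by
  intro response _
  unfold Spec_parse_brainstorm_response_py
  show parse_brainstorm_response_py response = parse_brainstorm_response_py_alt response
  simp only [parse_brainstorm_response_py, parse_brainstorm_response_py_alt]
  rw [pvSkipPrefix, pvBlocks_items]
  cases hd : ((PySem.Str.split? response "\n").getD []).dropWhile (fun l => !pvIsTitle l) with
  | nil =>
    rw [pvBlocksD_nil]
    rfl
  | cons x r =>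
    have hx : pvIsTitle x = true := by
      have := pvHeadDropWhile (fun l => !pvIsTitle l) _ x r hd
      simpa using this
    rw [List.foldl_cons, pvStepA_title _ _ hx]
    rw [if_pos (by rfl : ((PySem.Dict.empty : PySem.Dict String String)).items.isEmpty = true)]
    show ((pvFinishA (r.foldl pvStepA ([], pvMkIdea (pvAfterColon x) none))).take 5).map (fun d => d.items) = _
    rw [pvFoldA_blocksD, pvOr_none, ← pvBlocksD_cons]
    simp only [List.nil_append, List.map_take]
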